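-- pv_equiv track=rewrite | github.com/gino2013/LucianLeetcodeDaily | solutions/2025-09-03/3027_optimized.py | _simple_solution
-- ===== SOURCE A (Python) =====
-- def _simple_solution(points):
--     """處理有重複點的情況"""
--     n = len(points)
--     count = 0
--
--     for i in range(n):
--         alice_x, alice_y = points[i]
--
--         for j in range(n):
--             if i == j:
--                 continue
--
--             bob_x, bob_y = points[j]
--
--             if alice_x <= bob_x and alice_y >= bob_y:
--                 valid = True
--                 for k in range(n):
--                     if k != i and k != j:
--                         x, y = points[k]
--                         if alice_x <= x <= bob_x and bob_y <= y <= alice_y: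
--                             valid = False
--                             break
--
--                 if valid:
--                     count += 1
--
--     return count
-- ===== SOURCE B (Python) =====
-- def _simple_solution(points):
--     """Sort-and-sweep: O(n^2) after sorting by (x asc, y desc), with a multiplicity
--     dict to settle duplicate points, instead of A's O(n^3) triple loop."""
--     n = len(points)
--     mult = {}
--     for p in points:
--         key = (p[0], p[1])
--         mult[key] = mult.get(key, 0) + 1
--     order = sorted(range(n), key=lambda t: (points[t][0], -points[t][1]))
--     count = 0
--     for i in range(n):
--         ax, ay = points[i]
--         best = None
--         for j in order:
--             if j == i:
--                 continue
--             bx, by = points[j]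
--             if bx < ax or by > ay:
--                 continue
--             if best is None or by > best:
--                 need = 2 if (bx, by) == (ax, ay) else 1
--                 if mult[(bx, by)] == need:
--                     count += 1
--                 best = by
--     return count
-- ===== Notes on version B (the rewrite author's own statement) =====
-- stated objective: faster
-- what changed: A tests every ordered pair and scans all n points for a blocker inside the rectangle (O(n^3)); B sorts the indices once by (x asc, y desc) and, for each alice, does a single barrier sweep over that order, using a multiplicity dict to settle duplicate points, giving O(n^2) after an O(n log n) sort.
import Mathlib
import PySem

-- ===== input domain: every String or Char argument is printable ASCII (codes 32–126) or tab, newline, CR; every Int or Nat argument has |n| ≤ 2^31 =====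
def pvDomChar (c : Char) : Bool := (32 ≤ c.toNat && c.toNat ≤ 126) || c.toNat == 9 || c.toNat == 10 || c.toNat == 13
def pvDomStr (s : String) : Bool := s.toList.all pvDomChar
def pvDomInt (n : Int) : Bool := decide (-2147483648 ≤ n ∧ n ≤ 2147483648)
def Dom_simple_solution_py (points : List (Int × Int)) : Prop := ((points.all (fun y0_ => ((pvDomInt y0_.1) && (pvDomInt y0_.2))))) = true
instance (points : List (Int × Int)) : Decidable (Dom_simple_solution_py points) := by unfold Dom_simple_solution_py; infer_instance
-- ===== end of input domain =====

-- B replaces A's O(n^3) all-pairs-with-inner-scan by a sort-and-sweep (sort by x asc, y desc,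
-- then one barrier sweep per alice) plus a multiplicity dict for duplicate points.

-- shared indexing helper: points[k] for an in-range Nat index
def pvAt (ps : List (Int × Int)) (k : Nat) : Int × Int := ps[k]?.getD (0, 0)

-- ===== PORT A =====
-- the k-loop of A: returns `valid` (break on the first point inside the rectangle)
def sspInner (ps : List (Int × Int)) (i j : Nat) (ax ay bx bq : Int) : List Nat → Bool
  | [] => true
  | k :: ks =>
    if k ≠ i ∧ k ≠ j then
      if ax ≤ (pvAt ps k).1 ∧ (pvAt ps k).1 ≤ bx ∧ bq ≤ (pvAt ps k).2 ∧ (pvAt ps k).2 ≤ ay then false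
      else sspInner ps i j ax ay bx bq ks
    else sspInner ps i j ax ay bx bq ks

def simple_solution_py (points : List (Int × Int)) : Int :=
  (List.range points.length).foldl (fun count i =>
    (List.range points.length).foldl (fun c j =>
      if j = i then c
      else
        if (pvAt points i).1 ≤ (pvAt points j).1 ∧ (pvAt points i).2 ≥ (pvAt points j).2 then
          if sspInner points i j (pvAt points i).1 (pvAt points i).2 (pvAt points j).1 (pvAt points j).2 (List.range points.length) then c + 1
          else c
        else c) count) 0

-- ===== PORT B =====
-- mult[key] = mult.get(key, 0) + 1 over all points
def sspMult (points : List (Int × Int)) : PySem.Dict (Int × Int) Int :=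
  points.foldl (fun d p => d.insert p (d.getD p 0 + 1)) PySem.Dict.empty

-- Python key (points[t][0], -points[t][1]): tuples compare lexicographically
def pvKey (ps : List (Int × Int)) (t : Nat) : Lex (Int × Int) :=
  toLex ((pvAt ps t).1, -(pvAt ps t).2)

def sspOrder (points : List (Int × Int)) : List Nat :=
  PySem.List.sorted (List.range points.length) (pvKey points)

-- one step of the inner sweep: state = (count, best)
def sspStep (points : List (Int × Int)) (mult : PySem.Dict (Int × Int) Int) (i : Nat)
    (st : Int × Option Int) (j : Nat) : Int × Option Int :=
  if j = i then st
  else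
    if (pvAt points j).1 < (pvAt points i).1 ∨ (pvAt points i).2 < (pvAt points j).2 then st
    else
      let fire : Bool := match st.2 with | none => true | some m => decide (m < (pvAt points j).2)
      if fire then
        (if mult.getD (pvAt points j) 0 = (if pvAt points j = pvAt points i then 2 else 1) then st.1 + 1 else st.1,
         some (pvAt points j).2)
      else st

def simple_solution_py_alt (points : List (Int × Int)) : Int :=
  (List.range points.length).foldl
    (fun count i => ((sspOrder points).foldl (sspStep points (sspMult points) i) (count, none)).1) 0

-- ===== PRECONDITION & SPEC =====
def Spec_simple_solution_py (points : List (Int × Int)) (out : Int) : Prop := out = simple_solution_py_alt points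
instance (points : List (Int × Int)) (out : Int) : Decidable (Spec_simple_solution_py points out) := by unfold Spec_simple_solution_py; infer_instance

-- ===== CLAIM (what is proved, stated in full; the proofs are below) =====
def Claim_equal_simple_solution_py : Prop := ∀ (points : List (Int × Int)), Dom_simple_solution_py points → Spec_simple_solution_py points (simple_solution_py points)

-- ===== LEMMAS AND PROOFS =====

-- j is a sweep candidate for alice i (j ≠ i and the pair condition holds)
abbrev sMem (ps : List (Int × Int)) (i j : Nat) : Prop :=
  j ≠ i ∧ (pvAt ps i).1 ≤ (pvAt ps j).1 ∧ (pvAt ps j).2 ≤ (pvAt ps i).2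

-- point k lies in the closed rectangle of the pair (i, j)
abbrev blk (ps : List (Int × Int)) (i j k : Nat) : Prop :=
  (pvAt ps i).1 ≤ (pvAt ps k).1 ∧ (pvAt ps k).1 ≤ (pvAt ps j).1 ∧
  (pvAt ps j).2 ≤ (pvAt ps k).2 ∧ (pvAt ps k).2 ≤ (pvAt ps i).2

-- the ordered pair (i, j) is counted by A
def goodB (ps : List (Int × Int)) (i j : Nat) : Bool :=
  decide (sMem ps i j ∧ ∀ k ∈ List.range ps.length, k ≠ i → k ≠ j → ¬ blk ps i j k)

-- the best-barrier component of one sweep step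
def bestUpd (ps : List (Int × Int)) (i : Nat) (b : Option Int) (j : Nat) : Option Int :=
  if j = i then b
  else if (pvAt ps j).1 < (pvAt ps i).1 ∨ (pvAt ps i).2 < (pvAt ps j).2 then b
  else match b with
    | none => some (pvAt ps j).2
    | some m => if m < (pvAt ps j).2 then some (pvAt ps j).2 else b

theorem sspInner_eq_true_iff (ps : List (Int × Int)) (i j : Nat) (ax ay bx bq : Int) (ks : List Nat) :
    sspInner ps i j ax ay bx bq ks = true ↔
      ∀ k ∈ ks, k ≠ i → k ≠ j →
        ¬(ax ≤ (pvAt ps k).1 ∧ (pvAt ps k).1 ≤ bx ∧ bq ≤ (pvAt ps k).2 ∧ (pvAt ps k).2 ≤ ay) := by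
  induction ks with
  | nil => simp [sspInner]
  | cons k ks ih =>
    simp only [sspInner]
    split_ifs with h1 h2
    · simp only [false_iff]
      intro hall
      exact hall k (List.mem_cons_self ..) h1.1 h1.2 h2
    · rw [ih, List.forall_mem_cons]
      exact (and_iff_right (fun _ _ => h2)).symm
    · rw [ih, List.forall_mem_cons]
      exact (and_iff_right (fun hki hkj => absurd ⟨hki, hkj⟩ h1)).symm

theorem stepA_eq (ps : List (Int × Int)) (i : Nat) (c : Int) (j : Nat) :
    (if j = i then c
     else
       if (pvAt ps i).1 ≤ (pvAt ps j).1 ∧ (pvAt ps i).2 ≥ (pvAt ps j).2 then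
         if sspInner ps i j (pvAt ps i).1 (pvAt ps i).2 (pvAt ps j).1 (pvAt ps j).2 (List.range ps.length) then c + 1
         else c
       else c)
    = if goodB ps i j = true then c + 1 else c := by
  by_cases hji : j = i
  · have hg : goodB ps i j = false := by unfold goodB sMem; simp [hji]
    rw [hg]
    simp [hji]
  · by_cases hcond : (pvAt ps i).1 ≤ (pvAt ps j).1 ∧ (pvAt ps i).2 ≥ (pvAt ps j).2
    · by_cases hin : sspInner ps i j (pvAt ps i).1 (pvAt ps i).2 (pvAt ps j).1 (pvAt ps j).2 (List.range ps.length) = true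
      · have hg : goodB ps i j = true := by
          unfold goodB
          rw [decide_eq_true_eq]
          exact ⟨⟨hji, hcond.1, hcond.2⟩, fun k hk hki hkj hblk =>
            (sspInner_eq_true_iff ps i j _ _ _ _ _).mp hin k hk hki hkj hblk⟩
        simp [hji, hcond, hin, hg]
      · have hg : goodB ps i j = false := by
          unfold goodB
          rw [decide_eq_false_iff_not]
          rintro ⟨_, hall⟩
          exact hin ((sspInner_eq_true_iff ps i j _ _ _ _ _).mpr hall)
        simp [hji, hcond, hin, hg]
    · have hg : goodB ps i j = false := by
        unfold goodB sMem
        rw [decide_eq_false_iff_not]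
        rintro ⟨⟨_, h1, h2⟩, _⟩
        exact hcond ⟨h1, h2⟩
      simp [hji, hcond, hg]

theorem A_char (ps : List (Int × Int)) :
    simple_solution_py ps
      = ((List.range ps.length).map (fun i => ((List.range ps.length).countP (goodB ps i) : Int))).sum := by
  unfold simple_solution_py
  have houter : (fun (count : Int) (i : Nat) =>
      (List.range ps.length).foldl (fun c j =>
        if j = i then c
        else
          if (pvAt ps i).1 ≤ (pvAt ps j).1 ∧ (pvAt ps i).2 ≥ (pvAt ps j).2 then
            if sspInner ps i j (pvAt ps i).1 (pvAt ps i).2 (pvAt ps j).1 (pvAt ps j).2 (List.range ps.length) then c + 1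
            else c
          else c) count)
      = fun count i => count + ((List.range ps.length).countP (goodB ps i) : Int) := by
    funext count i
    rw [show (fun (c : Int) (j : Nat) =>
        if j = i then c
        else
          if (pvAt ps i).1 ≤ (pvAt ps j).1 ∧ (pvAt ps i).2 ≥ (pvAt ps j).2 then
            if sspInner ps i j (pvAt ps i).1 (pvAt ps i).2 (pvAt ps j).1 (pvAt ps j).2 (List.range ps.length) then c + 1
            else c
          else c)
      = fun (c : Int) (j : Nat) => if goodB ps i j = true then c + 1 else c
      from funext fun c => funext fun j => stepA_eq ps i c j]
    exact PySem.List.foldl_count_if _ _ _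
  rw [houter, PySem.List.foldl_add, zero_add]

theorem sspStep_snd (ps : List (Int × Int)) (mult : PySem.Dict (Int × Int) Int) (i : Nat)
    (st : Int × Option Int) (j : Nat) :
    (sspStep ps mult i st j).2 = bestUpd ps i st.2 j := by
  rcases st with ⟨cc, bb⟩
  by_cases h1 : j = i
  · simp [sspStep, bestUpd, h1]
  · by_cases h2 : (pvAt ps j).1 < (pvAt ps i).1 ∨ (pvAt ps i).2 < (pvAt ps j).2
    · simp [sspStep, bestUpd, h1, h2]
    · cases bb with
      | none => simp [sspStep, bestUpd, h1, h2]
      | some m =>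
        by_cases h3 : m < (pvAt ps j).2
        · simp [sspStep, bestUpd, h1, h2, h3]
        · simp [sspStep, bestUpd, h1, h2, h3]

theorem bestOf_lt_iff (ps : List (Int × Int)) (i : Nat) (v : Int) :
    ∀ (done : List Nat) (b : Option Int),
      ((∀ m, done.foldl (bestUpd ps i) b = some m → m < v) ↔
        ((∀ m, b = some m → m < v) ∧ ∀ k ∈ done, sMem ps i k → (pvAt ps k).2 < v)) := by
  intro done
  induction done with
  | nil => intro b; simp
  | cons j t ih =>
    intro b
    have hstep : (∀ m, bestUpd ps i b j = some m → m < v) ↔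
        ((∀ m, b = some m → m < v) ∧ (sMem ps i j → (pvAt ps j).2 < v)) := by
      by_cases hji : j = i
      · simp [bestUpd, hji]
      · by_cases hskip : (pvAt ps j).1 < (pvAt ps i).1 ∨ (pvAt ps i).2 < (pvAt ps j).2
        · have hns : ¬ sMem ps i j := by rintro ⟨_, h1, h2⟩; omega
          simp [bestUpd, hji, hskip, hns]
        · have hs : sMem ps i j := ⟨hji, by omega, by omega⟩
          cases b with
          | none => simp [bestUpd, hji, hskip, hs]
          | some m =>
            by_cases hm : m < (pvAt ps j).2
            · simp only [bestUpd, if_neg hji, if_neg hskip, if_pos hm]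
              constructor
              · intro h
                have hy := h _ rfl
                exact ⟨fun m' hm' => by cases hm'; omega, fun _ => by omega⟩
              · rintro ⟨h1, h2⟩ m' hm'
                cases hm'
                exact h2 hs
            · simp only [bestUpd, if_neg hji, if_neg hskip, if_neg hm]
              constructor
              · intro h
                refine ⟨h, fun _ => ?_⟩
                have := h m rfl
                omega
              · rintro ⟨h1, _⟩
                exact h1
    rw [List.foldl_cons, ih, hstep, List.forall_mem_cons]
    tauto

theorem count_eq_countP_range (ps : List (Int × Int)) (p : Int × Int) :
    ps.count p = (List.range ps.length).countP (fun k => decide (pvAt ps k = p)) := by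
  induction ps with
  | nil => simp
  | cons q t ih =>
    rw [List.length_cons, List.range_succ_eq_map]
    simp only [List.countP_cons, List.countP_map]
    have hs : ((fun k => decide (pvAt (q :: t) k = p)) ∘ Nat.succ) = fun k => decide (pvAt t k = p) := by
      funext k
      have hpt : pvAt (q :: t) (Nat.succ k) = pvAt t k := by
        unfold pvAt
        rw [List.getElem?_cons_succ]
      rw [Function.comp_apply, hpt]
    have h0 : pvAt (q :: t) 0 = q := rfl
    rw [hs, ← ih, List.count_cons, h0]
    by_cases hqp : q = p
    · simp [hqp]
    · simp [hqp]

theorem length_eq_one_of {l : List Nat} {a : Nat} (hnd : l.Nodup) (ha : a ∈ l)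
    (hall : ∀ x ∈ l, x = a) : l.length = 1 := by
  have hp : l.Perm [a] := by
    rw [List.perm_ext_iff_of_nodup hnd (by simp)]
    intro x
    constructor
    · intro h; simp [hall x h]
    · intro h; simp at h; subst h; exact ha
  simpa using hp.length_eq

theorem length_eq_two_of {l : List Nat} {a b : Nat} (hnd : l.Nodup) (hab : a ≠ b)
    (ha : a ∈ l) (hb : b ∈ l) (hall : ∀ x ∈ l, x = a ∨ x = b) : l.length = 2 := by
  have hp : l.Perm [a, b] := by
    rw [List.perm_ext_iff_of_nodup hnd (by simp [hab])]
    intro x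
    constructor
    · intro h; rcases hall x h with rfl | rfl <;> simp
    · intro h; rcases (by simpa using h : x = a ∨ x = b) with rfl | rfl <;> assumption
  simpa using hp.length_eq

-- unfolding of the lexicographic key comparison
theorem pvKey_le_iff (ps : List (Int × Int)) (a b : Nat) :
    pvKey ps a ≤ pvKey ps b ↔
      ((pvAt ps a).1 < (pvAt ps b).1 ∨
        ((pvAt ps a).1 = (pvAt ps b).1 ∧ (pvAt ps b).2 ≤ (pvAt ps a).2)) := by
  unfold pvKey
  rw [Prod.Lex.le_iff]
  simp only [ofLex_toLex]
  omega

theorem sweep_step (ps : List (Int × Int)) (i j : Nat) (done t : List Nat) (c : Int)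
    (hi : i < ps.length)
    (hperm : (done ++ j :: t).Perm (List.range ps.length))
    (hsort : (done ++ j :: t).Pairwise (fun a b => pvKey ps a ≤ pvKey ps b)) :
    sspStep ps (sspMult ps) i (c, done.foldl (bestUpd ps i) none) j
      = (c + (if goodB ps i j = true then 1 else 0), (done ++ [j]).foldl (bestUpd ps i) none) := by
  have hsnd : (sspStep ps (sspMult ps) i (c, done.foldl (bestUpd ps i) none) j).2
      = (done ++ [j]).foldl (bestUpd ps i) none := by
    rw [List.foldl_append, List.foldl_cons, List.foldl_nil]
    exact sspStep_snd ps (sspMult ps) i _ j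
  refine Prod.ext ?_ hsnd
  by_cases hji : j = i
  · have hg : goodB ps i j = false := by unfold goodB sMem; simp [hji]
    rw [hg]
    simp [sspStep, hji]
  · by_cases hskip : (pvAt ps j).1 < (pvAt ps i).1 ∨ (pvAt ps i).2 < (pvAt ps j).2
    · have hg : goodB ps i j = false := by
        unfold goodB sMem
        rw [decide_eq_false_iff_not]
        rintro ⟨⟨_, h1, h2⟩, _⟩
        omega
      simp [sspStep, hji, hskip, hg]
    · have hS : sMem ps i j := ⟨hji, by omega, by omega⟩
      have hnd : (done ++ j :: t).Nodup := hperm.nodup_iff.mpr List.nodup_range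
      have hjd : j ∉ done := fun h =>
        (List.nodup_cons.mp (List.nodup_middle.mp hnd)).1 (List.mem_append_left _ h)
      have hkey_done : ∀ k ∈ done, pvKey ps k ≤ pvKey ps j := by
        have h := (List.pairwise_append.mp hsort).2.2
        exact fun k hk => h k hk j (List.mem_cons_self ..)
      have hkey_t : ∀ k ∈ t, pvKey ps j ≤ pvKey ps k :=
        (List.pairwise_cons.mp (List.pairwise_append.mp hsort).2.1).1
      have hmemr : ∀ k, k ∈ done ++ j :: t → k ∈ List.range ps.length :=
        fun k hk => hperm.mem_iff.mp hk
      have hj : j < ps.length := List.mem_range.mp (hmemr j (by simp))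
      by_cases hfire : ∀ m, done.foldl (bestUpd ps i) none = some m → m < (pvAt ps j).2
      · -- barrier below: the mult test decides the pair
        have hlt : ∀ k ∈ done, sMem ps i k → (pvAt ps k).2 < (pvAt ps j).2 :=
          ((bestOf_lt_iff ps i ((pvAt ps j).2) done none).mp hfire).2
        have hmult : (sspMult ps).getD (pvAt ps j) 0 = (ps.count (pvAt ps j) : Int) := by
          unfold sspMult
          rw [PySem.Dict.getD_foldl_insert_add_one]
          simp
        have hcnt : goodB ps i j = true ↔
            (ps.count (pvAt ps j) : Int) = (if pvAt ps j = pvAt ps i then 2 else 1) := by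
          have hcnt' : ps.count (pvAt ps j)
              = ((List.range ps.length).filter (fun k => decide (pvAt ps k = pvAt ps j))).length := by
            rw [count_eq_countP_range, List.countP_eq_length_filter]
          have hFnd : ((List.range ps.length).filter (fun k => decide (pvAt ps k = pvAt ps j))).Nodup :=
            List.Nodup.filter _ List.nodup_range
          have hjF : j ∈ (List.range ps.length).filter (fun k => decide (pvAt ps k = pvAt ps j)) :=
            List.mem_filter.mpr ⟨List.mem_range.mpr hj, by simp⟩
          constructor
          · intro hg
            have hg' := hg
            unfold goodB at hg'
            rw [decide_eq_true_eq] at hg'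
            obtain ⟨hSm, hall⟩ := hg'
            by_cases hba : pvAt ps j = pvAt ps i
            · have hiF : i ∈ (List.range ps.length).filter (fun k => decide (pvAt ps k = pvAt ps j)) :=
                List.mem_filter.mpr ⟨List.mem_range.mpr hi, by simp [hba]⟩
              have hij : i ≠ j := fun h => hS.1 h.symm
              have hallF : ∀ x ∈ (List.range ps.length).filter (fun k => decide (pvAt ps k = pvAt ps j)),
                  x = i ∨ x = j := by
                intro x hxF
                by_contra hx
                push Not at hx
                have hxr := (List.mem_filter.mp hxF).1
                have hxeq : pvAt ps x = pvAt ps j := by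
                  have := (List.mem_filter.mp hxF).2
                  simpa using this
                have hx1 : (pvAt ps x).1 = (pvAt ps j).1 := by rw [hxeq]
                have hx2 : (pvAt ps x).2 = (pvAt ps j).2 := by rw [hxeq]
                have hb1 := hSm.2.1
                have hb2 := hSm.2.2
                exact hall x hxr hx.1 hx.2 ⟨by omega, by omega, by omega, by omega⟩
              have hlen := length_eq_two_of hFnd hij hiF hjF
                (fun x hx => (hallF x hx).imp id id)
              rw [hcnt', if_pos hba, hlen]
              rfl
            · have hallF : ∀ x ∈ (List.range ps.length).filter (fun k => decide (pvAt ps k = pvAt ps j)),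
                  x = j := by
                intro x hxF
                by_contra hx
                have hxr := (List.mem_filter.mp hxF).1
                have hxeq : pvAt ps x = pvAt ps j := by
                  have := (List.mem_filter.mp hxF).2
                  simpa using this
                have hxi : x ≠ i := by
                  intro h
                  subst h
                  exact hba hxeq.symm
                have hx1 : (pvAt ps x).1 = (pvAt ps j).1 := by rw [hxeq]
                have hx2 : (pvAt ps x).2 = (pvAt ps j).2 := by rw [hxeq]
                have hb1 := hSm.2.1
                have hb2 := hSm.2.2
                exact hall x hxr hxi hx ⟨by omega, by omega, by omega, by omega⟩
              have hlen := length_eq_one_of hFnd hjF hallF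
              rw [hcnt', if_neg hba, hlen]
              rfl
          · intro hcount
            unfold goodB
            rw [decide_eq_true_eq]
            refine ⟨hS, ?_⟩
            intro k hkr hki hkj hblk
            by_cases hkb : pvAt ps k = pvAt ps j
            · -- an extra copy of points[j]: the count cannot match
              have hkF : k ∈ (List.range ps.length).filter (fun k => decide (pvAt ps k = pvAt ps j)) :=
                List.mem_filter.mpr ⟨hkr, by simp [hkb]⟩
              by_cases hba : pvAt ps j = pvAt ps i
              · have hiF : i ∈ (List.range ps.length).filter (fun k => decide (pvAt ps k = pvAt ps j)) :=
                  List.mem_filter.mpr ⟨List.mem_range.mpr hi, by simp [hba]⟩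
                have hij : i ≠ j := fun h => hS.1 h.symm
                have hsub : [k, i, j].Subperm
                    ((List.range ps.length).filter (fun k => decide (pvAt ps k = pvAt ps j))) := by
                  apply List.subperm_of_subset
                  · simp [hki, hkj, hij]
                  · intro x hx
                    rcases (by simpa using hx : x = k ∨ x = i ∨ x = j) with rfl | rfl | rfl
                    · exact hkF
                    · exact hiF
                    · exact hjF
                have h3 := hsub.length_le
                simp only [List.length_cons, List.length_nil] at h3
                rw [hcnt', if_pos hba] at hcount
                omega
              · have hsub : [k, j].Subperm
                    ((List.range ps.length).filter (fun k => decide (pvAt ps k = pvAt ps j))) := by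
                  apply List.subperm_of_subset
                  · simp [hkj]
                  · intro x hx
                    rcases (by simpa using hx : x = k ∨ x = j) with rfl | rfl
                    · exact hkF
                    · exact hjF
                have h2 := hsub.length_le
                simp only [List.length_cons, List.length_nil] at h2
                rw [hcnt', if_neg hba] at hcount
                omega
            · -- a genuinely different blocking point: it sits before j in the sweep
              have hkmem : k ∈ done ++ j :: t := hperm.mem_iff.mpr hkr
              rcases List.mem_append.mp hkmem with hkdone | hkjt
              · have hkS : sMem ps i k := ⟨hki, hblk.1, hblk.2.2.2⟩
                have h1 := hlt k hkdone hkS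
                have h2 := hblk.2.2.1
                omega
              · rcases List.mem_cons.mp hkjt with rfl | hkt
                · exact hkj rfl
                · have hk := (pvKey_le_iff ps j k).mp (hkey_t k hkt)
                  have hx1 := hblk.2.1
                  have hy1 := hblk.2.2.1
                  have hxk : (pvAt ps k).1 = (pvAt ps j).1 := by omega
                  have hyk : (pvAt ps k).2 = (pvAt ps j).2 := by omega
                  exact hkb (Prod.ext hxk hyk)
        -- now evaluate the step
        rcases hBB : done.foldl (bestUpd ps i) none with _ | m
        · by_cases hg : goodB ps i j = true
          · have h2 := hcnt.mp hg
            simp [sspStep, hji, hskip, hmult, h2, hg]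
          · have h2 : ¬((ps.count (pvAt ps j) : Int) = (if pvAt ps j = pvAt ps i then 2 else 1)) :=
              fun h => hg (hcnt.mpr h)
            simp [sspStep, hji, hskip, hmult, h2, hg]
        · have hmv : m < (pvAt ps j).2 := hfire m hBB
          by_cases hg : goodB ps i j = true
          · have h2 := hcnt.mp hg
            simp [sspStep, hji, hskip, hmult, hmv, h2, hg]
          · have h2 : ¬((ps.count (pvAt ps j) : Int) = (if pvAt ps j = pvAt ps i then 2 else 1)) :=
              fun h => hg (hcnt.mpr h)
            simp [sspStep, hji, hskip, hmult, hmv, h2, hg]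
      · -- barrier at or above y_j: some earlier candidate blocks the pair
        have hex : ∃ k ∈ done, sMem ps i k ∧ ¬((pvAt ps k).2 < (pvAt ps j).2) := by
          by_contra hno
          push Not at hno
          exact hfire ((bestOf_lt_iff ps i ((pvAt ps j).2) done none).mpr
            ⟨by simp, fun k hk hs => hno k hk hs⟩)
        obtain ⟨k, hkdone, hkS, hky⟩ := hex
        have hg : goodB ps i j = false := by
          unfold goodB
          rw [decide_eq_false_iff_not]
          rintro ⟨_, hall⟩
          have hkx := (pvKey_le_iff ps k j).mp (hkey_done k hkdone)
          refine hall k (hmemr k (List.mem_append_left _ hkdone)) hkS.1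
            (fun h => hjd (h ▸ hkdone)) ⟨hkS.2.1, by omega, by omega, hkS.2.2⟩
        push Not at hfire
        obtain ⟨m, hBB, hmv⟩ := hfire
        have hm' : ¬ m < (pvAt ps j).2 := not_lt.mpr hmv
        rw [hg]
        simp [sspStep, hji, hskip, hBB, hm']
  -- end
theorem sweep (ps : List (Int × Int)) (i : Nat) (hi : i < ps.length) :
    ∀ (l done : List Nat) (c : Int),
      (done ++ l).Perm (List.range ps.length) →
      (done ++ l).Pairwise (fun a b => pvKey ps a ≤ pvKey ps b) →
      (l.foldl (sspStep ps (sspMult ps) i) (c, done.foldl (bestUpd ps i) none)).1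
        = c + (l.countP (goodB ps i) : Int) := by
  intro l
  induction l with
  | nil => intro done c _ _; simp
  | cons j t ih =>
    intro done c hperm hsort
    rw [List.foldl_cons, sweep_step ps i j done t c hi hperm hsort]
    rw [List.append_cons] at hperm hsort
    rw [ih (done ++ [j]) _ hperm hsort, List.countP_cons]
    push_cast
    by_cases h : goodB ps i j = true
    · simp [h]
      ring
    · simp [h]

theorem B_char (ps : List (Int × Int)) :
    simple_solution_py_alt ps
      = ((List.range ps.length).map (fun i => ((List.range ps.length).countP (goodB ps i) : Int))).sum := by
  unfold simple_solution_py_alt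
  rw [PySem.List.foldl_congr_mem _ _
    (fun count i => count + ((List.range ps.length).countP (goodB ps i) : Int)) 0 ?_]
  · rw [PySem.List.foldl_add, zero_add]
  · intro acc i hi
    have hi' : i < ps.length := List.mem_range.mp hi
    have hperm : (([] : List Nat) ++ sspOrder ps).Perm (List.range ps.length) := by
      simpa [sspOrder] using PySem.List.sorted_perm (List.range ps.length) (pvKey ps) false
    have hsort : (([] : List Nat) ++ sspOrder ps).Pairwise (fun a b => pvKey ps a ≤ pvKey ps b) := by
      simpa [sspOrder] using PySem.List.sorted_pairwise (List.range ps.length) (pvKey ps)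
    have h := sweep ps i hi' (sspOrder ps) [] acc hperm hsort
    simp only [List.foldl_nil] at h
    have hcp : (sspOrder ps).countP (goodB ps i) = (List.range ps.length).countP (goodB ps i) :=
      List.Perm.countP_eq _ (by simpa [sspOrder] using PySem.List.sorted_perm (List.range ps.length) (pvKey ps) false)
    rw [h, hcp]

-- ===== VERDICT (by name: the statement is the Claim_ definition above) =====
theorem simple_solution_py_spec : Claim_equal_simple_solution_py := by
  intro points _
  unfold Spec_simple_solution_py
  rw [A_char, B_char]
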